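-- pv_equiv track=rewrite | github.com/teemutoikkanen/sixPlusTracker | tracker.py | rfiPossible
-- ===== SOURCE A (Python) =====
-- def rfiPossible(screenName, hand):
--
--     actions = hand.split('*** HOLE CARDS ***')[1].split('*** SUMMARY ***')[0]
--     actionsArray = actions.split('\n')[2:]
--
--     for line in actionsArray:
--         if (screenName in line):
--             return True
--         if ('raises' in line and screenName not in line):
--             return False
--         # todo: if everyone folds and btn wins the pot return False
--
--     # split *** HOLE CARDS *** ja gaiggibeliin -- jos raises ennen meitä,
--     # return False
--
--     return True
-- ===== SOURCE B (Python) =====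
-- def rfiPossible(screenName, hand):
--     actions = hand.split('*** HOLE CARDS ***')[1].split('*** SUMMARY ***')[0]
--     lines = actions.split('\n')[2:]
--     idx1 = next((i for i, l in enumerate(lines) if screenName in l), None)
--     idx2 = next((i for i, l in enumerate(lines)
--                  if 'raises' in l and screenName not in l), None)
--     if idx2 is None:
--         return True
--     return idx1 is not None and idx1 < idx2
-- ===== Notes on version B (the rewrite author's own statement) =====
-- stated objective: alternative
-- what changed: The one-pass short-circuit scan with fall-through True is replaced by two independent first-match index searches (first line mentioning screenName, first opposing raise) followed by an index comparison.
import Mathlib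
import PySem

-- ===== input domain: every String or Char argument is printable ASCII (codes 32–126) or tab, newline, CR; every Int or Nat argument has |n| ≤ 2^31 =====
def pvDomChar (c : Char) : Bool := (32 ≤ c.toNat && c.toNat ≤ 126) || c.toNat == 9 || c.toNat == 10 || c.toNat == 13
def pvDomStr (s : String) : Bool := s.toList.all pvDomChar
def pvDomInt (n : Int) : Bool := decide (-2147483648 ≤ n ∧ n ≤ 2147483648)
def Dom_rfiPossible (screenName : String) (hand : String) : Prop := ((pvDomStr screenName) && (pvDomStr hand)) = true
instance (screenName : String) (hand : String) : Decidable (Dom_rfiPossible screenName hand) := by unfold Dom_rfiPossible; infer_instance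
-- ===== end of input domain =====

-- B replaces A's one-pass short-circuit scan by two first-match index searches and an
-- index comparison (alternative decomposition, same cost). Both ports share the literal
-- parsing prefix (the two splits, the [2:] slice), which is part of the task's input format.

-- ===== PORT A =====
-- the parsing prefix shared by both Pythons, transliterated once:
-- hand.split('*** HOLE CARDS ***')[1].split('*** SUMMARY ***')[0].split('\n')[2:]
-- ([1] is total under Pre_; pyGetD is the total form used only under it)
-- s.split(sep) with a nonempty literal sep: split? is some there, getD is never the default
def pySplit (s sep : String) : List String := (PySem.Str.split? s sep).getD []

def rfiParse (hand : String) : List String :=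
  let actions :=
    PySem.List.pyGetD
      (pySplit (PySem.List.pyGetD (pySplit hand "*** HOLE CARDS ***") 1 "")
        "*** SUMMARY ***") 0 ""
  PySem.List.slice (pySplit actions "\n") (some 2) none

-- A's for-loop: return True at the first line containing screenName, False at the first
-- opposing raise, True if the loop falls through
def rfiLoopA (screenName : String) : List String → Bool
  | [] => true
  | l :: ls =>
    if PySem.Str.isIn screenName l then true
    else if PySem.Str.isIn "raises" l && !(PySem.Str.isIn screenName l) then false
    else rfiLoopA screenName ls

def rfiPossible (screenName : String) (hand : String) : Bool :=
  rfiLoopA screenName (rfiParse hand)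

-- ===== PORT B =====
def rfiPossible_alt (screenName : String) (hand : String) : Bool :=
  let lines := rfiParse hand
  let idx1 := lines.findIdx? (fun l => PySem.Str.isIn screenName l)
  let idx2 := lines.findIdx?
      (fun l => PySem.Str.isIn "raises" l && !(PySem.Str.isIn screenName l))
  match idx2 with
  | none => true
  | some j =>
    match idx1 with
    | none => false
    | some i => decide (i < j)

-- ===== PRECONDITION & SPEC =====
-- A raises IndexError when '*** HOLE CARDS ***' does not occur in hand (the [1] lookup);
-- exactly those inputs are excluded.
def Pre_rfiPossible (screenName : String) (hand : String) : Prop :=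
  PySem.Str.isIn "*** HOLE CARDS ***" hand = true
instance (screenName : String) (hand : String) : Decidable (Pre_rfiPossible screenName hand) := by
  unfold Pre_rfiPossible; infer_instance

def pvWitness_rfiPossible : String × String :=
  ("hero", "hdr\n*** HOLE CARDS ***\nl1\nl2\nvillain: raises 5\nhero: folds\n*** SUMMARY ***\nend")

def Spec_rfiPossible (screenName : String) (hand : String) (out : Bool) : Prop :=
  out = rfiPossible_alt screenName hand
instance (screenName : String) (hand : String) (out : Bool) : Decidable (Spec_rfiPossible screenName hand out) := by
  unfold Spec_rfiPossible; infer_instance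

-- ===== CLAIM (what is proved, stated in full; the proofs are below) =====
def Claim_equal_rfiPossible : Prop := ∀ (screenName : String) (hand : String), Dom_rfiPossible screenName hand → Pre_rfiPossible screenName hand → Spec_rfiPossible screenName hand (rfiPossible screenName hand)

-- ===== LEMMAS AND PROOFS =====
-- A's scan equals B's two-searches-then-compare decision on any list of lines
theorem rfiLoopA_eq_searches (screenName : String) (lines : List String) :
    rfiLoopA screenName lines =
      (match lines.findIdx?
          (fun l => PySem.Str.isIn "raises" l && !(PySem.Str.isIn screenName l)) with
        | none => true
        | some j =>
          match lines.findIdx? (fun l => PySem.Str.isIn screenName l) with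
          | none => false
          | some i => decide (i < j)) := by
  induction lines with
  | nil => simp [rfiLoopA]
  | cons l ls ih =>
    rw [List.findIdx?_cons, List.findIdx?_cons]
    by_cases h1 : PySem.Str.isIn screenName l = true
    · simp only [rfiLoopA, h1, Bool.not_true, Bool.and_false, if_true, Bool.false_eq_true,
        Bool.false_eq_true, ite_false]
      cases ls.findIdx?
          (fun l => PySem.Str.isIn "raises" l && !(PySem.Str.isIn screenName l)) with
      | none => rfl
      | some j => simp
    · by_cases h2 : PySem.Str.isIn "raises" l = true
      · simp only [rfiLoopA, h1, h2, Bool.not_false, Bool.and_true, if_true,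
          Bool.false_eq_true, ite_false]
        cases ls.findIdx? (fun l => PySem.Str.isIn screenName l) with
        | none => rfl
        | some i => simp
      · simp only [rfiLoopA, h1, h2, Bool.false_and, Bool.false_eq_true, ite_false]
        rw [ih]
        cases ls.findIdx?
            (fun l => PySem.Str.isIn "raises" l && !(PySem.Str.isIn screenName l)) with
        | none => rfl
        | some j =>
          cases ls.findIdx? (fun l => PySem.Str.isIn screenName l) with
          | none => rfl
          | some i => simp

-- ===== VERDICT (by name: the statement is the Claim_ definition above) =====
theorem rfiPossible_spec : Claim_equal_rfiPossible := by
  intro screenName hand _ _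
  unfold Spec_rfiPossible rfiPossible rfiPossible_alt
  exact rfiLoopA_eq_searches screenName (rfiParse hand)
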